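-- pv_equiv track=rewrite | github.com/Crispae/optimal-ph | src/EnzymePh/utils.py | sequenceRepair
-- ===== SOURCE A (Python) =====
-- def sequenceRepair(seq_list):
--     repaired = []
--     for index,seq in enumerate(seq_list):
--         if ("X" in seq):
--             seq = seq.replace("X","")
--         if ("B" in seq):
--             seq = seq.replace("B","")
--         if ("Z" in seq):
--             seq = seq.replace("Z","")
--
--         repaired.insert(index,seq)
--     return repaired
-- ===== SOURCE B (Python) =====
-- def sequenceRepair(seq_list):
--     return [''.join(c for c in seq if c not in 'XBZ') for seq in seq_list]
-- ===== Notes on version B (the rewrite author's own statement) =====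
-- stated objective: idiomatic
-- what changed: Replaces the three conditional whole-string replace passes and index-based insert with a single character-level filter per sequence in one list comprehension.
import Mathlib
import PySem

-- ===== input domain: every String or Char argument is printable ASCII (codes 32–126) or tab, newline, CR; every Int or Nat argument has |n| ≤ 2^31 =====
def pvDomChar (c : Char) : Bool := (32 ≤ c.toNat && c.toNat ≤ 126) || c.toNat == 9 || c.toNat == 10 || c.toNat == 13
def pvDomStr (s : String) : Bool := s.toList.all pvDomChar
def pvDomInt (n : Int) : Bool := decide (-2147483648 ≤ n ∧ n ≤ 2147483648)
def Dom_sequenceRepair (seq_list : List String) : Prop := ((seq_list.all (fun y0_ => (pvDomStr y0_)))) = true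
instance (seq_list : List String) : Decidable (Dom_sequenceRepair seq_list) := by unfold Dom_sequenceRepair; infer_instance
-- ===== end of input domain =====

-- B replaces A's three conditional whole-string replace passes (and insert-at-index) with a
-- single character-level filter per sequence; idiomatic, same asymptotic cost.

-- ===== PORT A =====
-- the loop body of A: three conditional replace passes on one sequence
def pvRepairOne (seq : String) : String :=
  let seq1 := if PySem.Str.isIn "X" seq then PySem.Str.replace seq "X" "" else seq
  let seq2 := if PySem.Str.isIn "B" seq1 then PySem.Str.replace seq1 "B" "" else seq1
  if PySem.Str.isIn "Z" seq2 then PySem.Str.replace seq2 "Z" "" else seq2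

def sequenceRepair (seq_list : List String) : List String :=
  (PySem.List.enumerate seq_list).foldl
    (fun repaired p => PySem.List.insert repaired p.1 (pvRepairOne p.2)) []

-- ===== PORT B =====
def sequenceRepair_alt (seq_list : List String) : List String :=
  seq_list.map (fun seq =>
    String.ofList (seq.toList.filter (fun c => !(c == 'X' || c == 'B' || c == 'Z'))))

-- ===== PRECONDITION & SPEC =====
def Spec_sequenceRepair (seq_list : List String) (out : List String) : Prop := out = sequenceRepair_alt seq_list
instance (seq_list : List String) (out : List String) : Decidable (Spec_sequenceRepair seq_list out) := by unfold Spec_sequenceRepair; infer_instance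

-- ===== CLAIM (what is proved, stated in full; the proofs are below) =====
def Claim_equal_sequenceRepair : Prop := ∀ (seq_list : List String), Dom_sequenceRepair seq_list → Spec_sequenceRepair seq_list (sequenceRepair seq_list)

-- ===== LEMMAS AND PROOFS =====

-- replace.go with a single-char pattern and empty replacement is a filter
theorem pv_go_filter (x : Char) : ∀ (fuel : Nat) (l acc : List Char), l.length ≤ fuel →
    PySem.Chars.replace.go [x] [] fuel l acc = acc.reverse ++ l.filter (fun c => !(c == x)) := by
  intro fuel
  induction fuel with
  | zero =>
    intro l acc h
    have : l = [] := List.length_eq_zero_iff.mp (Nat.le_zero.mp h)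
    subst this
    simp [PySem.Chars.replace.go]
  | succ n ih =>
    intro l acc h
    cases l with
    | nil => simp [PySem.Chars.replace.go]
    | cons c t =>
      simp only [PySem.Chars.replace.go]
      by_cases hx : c = x
      · subst hx
        have hp : List.isPrefixOf [c] (c :: t) = true := by
          simp [List.isPrefixOf]
        simp only [hp, if_pos, List.length_cons, List.drop_succ_cons, List.drop_zero,
          List.reverse_nil, List.nil_append, List.length_nil]
        rw [ih t _ (by simpa using Nat.le_of_succ_le_succ h)]
        simp
      · have hp : List.isPrefixOf [x] (c :: t) = false := by
          simp [List.isPrefixOf]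
          exact fun hh => (hx hh.symm).elim
        simp only [hp, Bool.false_eq_true, if_false]
        rw [ih t _ (by simpa using Nat.le_of_succ_le_succ h)]
        simp [hx]

theorem pv_replace_filter (x : Char) (s : List Char) :
    PySem.Chars.replace s [x] [] = s.filter (fun c => !(c == x)) := by
  rw [PySem.Chars.replace, if_neg (by simp)]
  exact pv_go_filter x s.length s [] le_rfl

theorem pv_singleton_infix {x : Char} {s : List Char} : [x] <:+: s ↔ x ∈ s := by
  constructor
  · intro h; exact h.subset (List.mem_singleton_self x)
  · intro h
    obtain ⟨l1, l2, rfl⟩ := List.append_of_mem h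
    exact ⟨l1, l2, by simp⟩

theorem pv_cond_replace (x : Char) (p e s : String) (hp : p.toList = [x]) (he : e.toList = []) :
    (if PySem.Str.isIn p s then PySem.Str.replace s p e else s).toList
      = s.toList.filter (fun c => !(c == x)) := by
  by_cases h : PySem.Str.isIn p s = true
  · rw [if_pos h, PySem.Str.toList_replace, hp, he]
    exact pv_replace_filter x s.toList
  · rw [if_neg h]
    have hmem : x ∉ s.toList := by
      intro hmem
      exact h ((PySem.Str.isIn_iff_infix p s).mpr (hp ▸ pv_singleton_infix.mpr hmem))
    symm
    apply List.filter_eq_self.mpr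
    intro c hc
    simp only [Bool.not_eq_eq_eq_not, Bool.not_true, beq_eq_false_iff_ne, ne_eq]
    intro hcx; exact hmem (hcx ▸ hc)

theorem pvRepairOne_eq (s : String) :
    pvRepairOne s = String.ofList (s.toList.filter (fun c => !(c == 'X' || c == 'B' || c == 'Z'))) := by
  apply String.toList_inj.mp
  simp only [pvRepairOne]
  rw [pv_cond_replace 'Z' "Z" "" _ rfl rfl,
      pv_cond_replace 'B' "B" "" _ rfl rfl,
      pv_cond_replace 'X' "X" "" s rfl rfl,
      List.filter_filter, List.filter_filter]
  rw [String.toList_ofList]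
  apply List.filter_congr
  intro c _
  cases hx : c == 'X' <;> cases hb : c == 'B' <;> cases hz : c == 'Z' <;> simp_all

theorem pv_insert_append (xs : List String) (v : String) :
    PySem.List.insert xs (xs.length : Int) v = xs ++ [v] := by
  simp only [PySem.List.insert, PySem.List.sliceIndices]
  rw [if_neg (by omega : ¬((xs.length : Int) < 0))]
  simp

theorem pv_fold_inv (l : List String) : ∀ (acc : List String),
    (PySem.List.enumerate l (acc.length : Int)).foldl
      (fun repaired p => PySem.List.insert repaired p.1 (pvRepairOne p.2)) acc
    = acc ++ l.map pvRepairOne := by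
  induction l with
  | nil => intro acc; simp [PySem.List.enumerate]
  | cons x t ih =>
    intro acc
    rw [PySem.List.enumerate_cons, List.foldl_cons]
    simp only [pv_insert_append]
    have := ih (acc ++ [pvRepairOne x])
    simp only [List.length_append, List.length_cons, List.length_nil] at this
    rw [show ((acc.length : Int) + 1) = ((acc.length + 1 : Nat) : Int) by push_cast; ring]
    simpa using this

-- ===== VERDICT (by name: the statement is the Claim_ definition above) =====
theorem sequenceRepair_spec : Claim_equal_sequenceRepair := by
  intro seq_list _
  show sequenceRepair seq_list = sequenceRepair_alt seq_list
  unfold sequenceRepair sequenceRepair_alt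
  rw [show (PySem.List.enumerate seq_list : List (Int × String))
        = PySem.List.enumerate seq_list ((List.length ([] : List String) : Int)) by rfl]
  rw [pv_fold_inv seq_list []]
  simp [pvRepairOne_eq]
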